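-- pv_equiv track=rewrite | github.com/liwenju0/sighan_raw | data_process.py | get_errors
-- ===== SOURCE A (Python) =====
-- import operator
--
-- unk_tokens = [' ', '“', '”', '‘', '’', '琊', '\n', '…', '—', '擤', '\t', '֍', '玕', '']
--
-- def get_errors(corrected_text, origin_text):
--     sub_details = []
--     for i, ori_char in enumerate(origin_text):
--         if i >= len(corrected_text):
--             continue
--         if ori_char in unk_tokens:
--             # deal with unk word
--             corrected_text = corrected_text[:i] + ori_char + corrected_text[i:]
--             continue
--         if ori_char != corrected_text[i]:
--             if ori_char.lower() == corrected_text[i]: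
--                 # pass english upper char
--                 corrected_text = corrected_text[:i] + ori_char + corrected_text[i + 1:]
--                 continue
--             sub_details.append((ori_char, corrected_text[i], i, i + 1))
--     sub_details = sorted(sub_details, key=operator.itemgetter(2))
--     return corrected_text, sub_details
-- ===== SOURCE B (Python) =====
-- unk_tokens = [' ', '“', '”', '‘', '’', '琊', '\n', '…', '—', '擤', '\t', '֍', '玕', '']
--
-- def get_errors(corrected_text, origin_text):
--     # Single left-to-right pass: output buffer + pointer into corrected_text,
--     # no per-step string slicing; indices are emitted in order, so no final sort.
--     out = []
--     sub_details = []
--     j = 0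
--     n = len(corrected_text)
--     for i, ori_char in enumerate(origin_text):
--         if j >= n:
--             break
--         if ori_char in unk_tokens:
--             out.append(ori_char)
--             continue
--         cur = corrected_text[j]
--         if ori_char != cur:
--             if ori_char.lower() == cur:
--                 out.append(ori_char)
--                 j += 1
--                 continue
--             sub_details.append((ori_char, cur, i, i + 1))
--         out.append(cur)
--         j += 1
--     return ''.join(out) + corrected_text[j:], sub_details
-- ===== Notes on version B (the rewrite author's own statement) =====
-- stated objective: alternative
-- what changed: Replaced A's per-step string slicing/reconstruction of corrected_text and its final sort by a single left-to-right pass with an output buffer and a pointer into corrected_text; sub_details are emitted already in index order so the sort disappears.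
import Mathlib
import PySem

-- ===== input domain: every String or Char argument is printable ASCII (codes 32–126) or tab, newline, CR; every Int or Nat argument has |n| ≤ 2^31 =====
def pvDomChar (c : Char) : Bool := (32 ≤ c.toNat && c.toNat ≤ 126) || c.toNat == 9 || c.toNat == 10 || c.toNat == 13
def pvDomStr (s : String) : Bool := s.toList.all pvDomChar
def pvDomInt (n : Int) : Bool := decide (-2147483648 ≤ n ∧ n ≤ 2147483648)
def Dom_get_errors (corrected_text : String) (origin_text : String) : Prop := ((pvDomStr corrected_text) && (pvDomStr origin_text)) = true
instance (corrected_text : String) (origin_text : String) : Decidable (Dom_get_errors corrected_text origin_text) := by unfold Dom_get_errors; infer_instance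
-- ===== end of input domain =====

-- B replaces A's per-step string slicing and final sort by a single pass with an
-- output buffer and a pointer into corrected_text, and drops the final sort (objective: alternative).

-- module constant unk_tokens; the Python list also contains '', which a single
-- character can never equal, so it is dropped from the Char list (exact).
def unkTokens : List Char := [' ', '“', '”', '‘', '’', '琊', '\n', '…', '—', '擤', '\t', '֍', '玕']

-- ===== PORT A =====
-- A's for-loop over enumerate(origin_text), carrying the mutated corrected_text
-- (as List Char) and the sub_details accumulator.  corrected_text[i] is read only
-- under the guard i < len(corrected_text), so pyGetD with a dummy default is exact.
def getErrorsLoopA : List (Int × Char) → List Char → List (String × String × Int × Int) →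
    List Char × List (String × String × Int × Int)
  | [], c, subs => (c, subs)
  | (i, o) :: rest, c, subs =>
    if (c.length : Int) ≤ i then getErrorsLoopA rest c subs
    else if o ∈ unkTokens then
      getErrorsLoopA rest (PySem.List.slice c none (some i) ++ [o] ++ PySem.List.slice c (some i) none) subs
    else
      let ci := PySem.List.pyGetD c i ' '
      if o ≠ ci then
        if PySem.Chars.lowerChar o = ci then
          getErrorsLoopA rest (PySem.List.slice c none (some i) ++ [o] ++ PySem.List.slice c (some (i + 1)) none) subs
        else getErrorsLoopA rest c (subs ++ [(String.ofList [o], String.ofList [ci], i, i + 1)])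
      else getErrorsLoopA rest c subs

def get_errors (corrected_text : String) (origin_text : String) : String × (List (String × String × Int × Int)) :=
  let r := getErrorsLoopA (PySem.List.enumerate origin_text.toList 0) corrected_text.toList []
  (String.ofList r.1, PySem.List.sorted r.2 (fun t => t.2.2.1) false)

-- ===== PORT B =====
-- Source B's loop: out buffer, pointer j (represented by the suffix corrected_text[j:]),
-- i the running enumerate index; 'break' when the suffix is exhausted.
def getErrorsLoopB : List Char → List Char → List (String × String × Int × Int) → List Char → Int →
    List Char × List (String × String × Int × Int)
  | [], out, subs, rest, _ => (out ++ rest, subs)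
  | _ :: _, out, subs, [], _ => (out ++ [], subs)
  | o :: os, out, subs, cur :: rs, i =>
      if o ∈ unkTokens then getErrorsLoopB os (out ++ [o]) subs (cur :: rs) (i + 1)
      else if o ≠ cur then
        if PySem.Chars.lowerChar o = cur then getErrorsLoopB os (out ++ [o]) subs rs (i + 1)
        else getErrorsLoopB os (out ++ [cur]) (subs ++ [(String.ofList [o], String.ofList [cur], i, i + 1)]) rs (i + 1)
      else getErrorsLoopB os (out ++ [cur]) subs rs (i + 1)

def get_errors_alt (corrected_text : String) (origin_text : String) : String × (List (String × String × Int × Int)) :=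
  let r := getErrorsLoopB origin_text.toList [] [] corrected_text.toList 0
  (String.ofList r.1, r.2)

-- ===== PRECONDITION & SPEC =====
def Spec_get_errors (corrected_text : String) (origin_text : String) (out : String × (List (String × String × Int × Int))) : Prop := out = get_errors_alt corrected_text origin_text
instance (corrected_text : String) (origin_text : String) (out : String × (List (String × String × Int × Int))) : Decidable (Spec_get_errors corrected_text origin_text out) := by unfold Spec_get_errors; infer_instance

-- ===== CLAIM (what is proved, stated in full; the proofs are below) =====
def Claim_equal_get_errors : Prop := ∀ (corrected_text : String) (origin_text : String), Dom_get_errors corrected_text origin_text → Spec_get_errors corrected_text origin_text (get_errors corrected_text origin_text)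

-- ===== LEMMAS AND PROOFS =====

-- once the corrected text is exhausted (len(c) ≤ i), A's loop skips every
-- remaining step: the state never changes again.
theorem loopA_done : ∀ (os : List Char) (m : Int) (c : List Char)
    (subs : List (String × String × Int × Int)), (c.length : Int) ≤ m →
    getErrorsLoopA (PySem.List.enumerate os m) c subs = (c, subs) := by
  intro os
  induction os with
  | nil => intro m c subs h; simp [PySem.List.enumerate, getErrorsLoopA]
  | cons o os ih =>
    intro m c subs h
    rw [PySem.List.enumerate_cons, getErrorsLoopA, if_pos h]
    exact ih (m + 1) c subs (by omega)

-- main invariant: A's loop on c = out ++ rest at step i = out.length equals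
-- B's loop with buffer out and remaining suffix rest.
theorem loop_eq : ∀ (os : List Char) (n : Nat) (out rest : List Char)
    (subs : List (String × String × Int × Int)), out.length = n →
    getErrorsLoopA (PySem.List.enumerate os (n : Int)) (out ++ rest) subs =
      getErrorsLoopB os out subs rest (n : Int) := by
  intro os
  induction os with
  | nil => intro n out rest subs h; simp [PySem.List.enumerate, getErrorsLoopA, getErrorsLoopB]
  | cons o os ih =>
    intro n out rest subs h
    rw [PySem.List.enumerate_cons, getErrorsLoopA]
    cases rest with
    | nil =>
      rw [if_pos (by simp [h])]
      rw [List.append_nil]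
      rw [loopA_done os ((n : Int) + 1) out subs (by omega)]
      simp [getErrorsLoopB]
    | cons cur rs =>
      rw [if_neg (by simp [h])]
      have htake : PySem.List.slice (out ++ cur :: rs) none (some (n : Int)) = out := by
        rw [PySem.List.slice_to_natCast]; simp [← h]
      have hdrop : PySem.List.slice (out ++ cur :: rs) (some (n : Int)) none = cur :: rs := by
        rw [PySem.List.slice_from_natCast]; simp [← h]
      have hdrop1 : PySem.List.slice (out ++ cur :: rs) (some ((n : Int) + 1)) none = rs := by
        have : ((n : Int) + 1) = ((n + 1 : Nat) : Int) := by push_cast; ring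
        rw [this, PySem.List.slice_from_natCast]
        have : out ++ cur :: rs = (out ++ [cur]) ++ rs := by simp
        rw [this, List.drop_append_of_le_length (by simp [h])]
        simp [h]
      have hget : PySem.List.pyGetD (out ++ cur :: rs) (n : Int) ' ' = cur := by
        rw [PySem.List.pyGetD_natCast, ← h]
        simp [List.getD]
      have hcast : ((n : Int) + 1) = ((n + 1 : Nat) : Int) := by push_cast; ring
      by_cases hu : o ∈ unkTokens
      · rw [if_pos hu, htake, hdrop]
        have : out ++ [o] ++ (cur :: rs) = (out ++ [o]) ++ (cur :: rs) := by simp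
        rw [this, hcast, ih (n + 1) (out ++ [o]) (cur :: rs) subs (by simp [h])]
        rw [getErrorsLoopB, if_pos hu, hcast]
      · rw [if_neg hu, getErrorsLoopB, if_neg hu]
        simp only [hget]
        by_cases hne : o ≠ cur
        · rw [if_pos hne, if_pos hne]
          by_cases hl : PySem.Chars.lowerChar o = cur
          · rw [if_pos hl, if_pos hl, htake, hdrop1]
            have : out ++ [o] ++ rs = (out ++ [o]) ++ rs := by simp
            rw [this, hcast, ih (n + 1) (out ++ [o]) rs subs (by simp [h])]
          · rw [if_neg hl, if_neg hl]
            have : out ++ cur :: rs = (out ++ [cur]) ++ rs := by simp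
            rw [this, hcast]
            exact ih (n + 1) (out ++ [cur]) rs _ (by simp [h])
        · rw [if_neg hne, if_neg hne]
          have : out ++ cur :: rs = (out ++ [cur]) ++ rs := by simp
          rw [this, hcast, ih (n + 1) (out ++ [cur]) rs subs (by simp [h])]

-- B emits sub_details with strictly increasing indices, so A's final sort is the identity.
theorem loopB_subs_sorted : ∀ (os : List Char) (out : List Char)
    (subs : List (String × String × Int × Int)) (rest : List Char) (i : Int),
    (∀ t ∈ subs, t.2.2.1 < i) →
    subs.Pairwise (fun a b => a.2.2.1 ≤ b.2.2.1) →
    (getErrorsLoopB os out subs rest i).2.Pairwise (fun a b => a.2.2.1 ≤ b.2.2.1) ∧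
      ∀ t ∈ (getErrorsLoopB os out subs rest i).2, t.2.2.1 < i + os.length := by
  intro os
  induction os with
  | nil =>
    intro out subs rest i hlt hp
    refine ⟨hp, ?_⟩
    simpa [getErrorsLoopB] using fun t ht => lt_of_lt_of_le (hlt t ht) (by omega)
  | cons o os ih =>
    intro out subs rest i hlt hp
    cases rest with
    | nil =>
      rw [getErrorsLoopB]
      refine ⟨hp, fun t ht => ?_⟩
      have := hlt t ht; simp; omega
    | cons cur rs =>
      rw [getErrorsLoopB]
      have hnext : ∀ t ∈ subs, t.2.2.1 < i + 1 := fun t ht => by have := hlt t ht; omega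
      have hlen : ∀ (r : List Char × List (String × String × Int × Int)),
          (∀ t ∈ r.2, t.2.2.1 < (i + 1) + (os.length : Int)) →
          ∀ t ∈ r.2, t.2.2.1 < i + ((o :: os).length : Int) := by
        intro r hr t ht; have := hr t ht; simp at this ⊢; omega
      by_cases hu : o ∈ unkTokens
      · rw [if_pos hu]
        obtain ⟨h1, h2⟩ := ih (out ++ [o]) subs (cur :: rs) (i + 1) hnext hp
        exact ⟨h1, hlen _ h2⟩
      · rw [if_neg hu]
        by_cases hne : o ≠ cur
        · rw [if_pos hne]
          by_cases hl : PySem.Chars.lowerChar o = cur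
          · rw [if_pos hl]
            obtain ⟨h1, h2⟩ := ih (out ++ [o]) subs rs (i + 1) hnext hp
            exact ⟨h1, hlen _ h2⟩
          · rw [if_neg hl]
            have hp' : (subs ++ [(String.ofList [o], String.ofList [cur], i, i + 1)]).Pairwise
                (fun a b => a.2.2.1 ≤ b.2.2.1) := by
              rw [List.pairwise_append]
              exact ⟨hp, List.pairwise_singleton _ _, by
                intro a ha b hb; simp at hb; subst hb
                exact le_of_lt (hlt a ha)⟩
            have hlt' : ∀ t ∈ subs ++ [(String.ofList [o], String.ofList [cur], i, i + 1)], t.2.2.1 < i + 1 := by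
              intro t ht; rcases List.mem_append.mp ht with h | h
              · have := hlt t h; omega
              · simp at h; subst h; simp
            obtain ⟨h1, h2⟩ := ih (out ++ [cur]) _ rs (i + 1) hlt' hp'
            exact ⟨h1, hlen _ h2⟩
        · rw [if_neg hne]
          obtain ⟨h1, h2⟩ := ih (out ++ [cur]) subs rs (i + 1) hnext hp
          exact ⟨h1, hlen _ h2⟩

-- ===== VERDICT (by name: the statement is the Claim_ definition above) =====
theorem get_errors_spec : Claim_equal_get_errors := by
  intro corrected_text origin_text _
  have heq := loop_eq origin_text.toList 0 [] corrected_text.toList [] rfl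
  obtain ⟨h1, -⟩ := loopB_subs_sorted origin_text.toList [] [] corrected_text.toList
    ((0 : Nat) : Int) (by simp) (by simp)
  simp only [List.nil_append, Nat.cast_zero] at heq h1
  simp only [Spec_get_errors, get_errors, get_errors_alt, heq]
  exact congrArg (Prod.mk _) (PySem.List.sorted_eq_self_of_pairwise _ _ h1)
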